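-- pv_equiv track=rewrite | github.com/nhrade/AdventOfCodeSolutions2025 | day2.py | better_is_invalid
-- ===== SOURCE A (Python) =====
-- def better_is_invalid(id):
--     id = str(id)
--     for seq_end in range(1, len(id) // 2 + 1):
--         sequence = id[:seq_end]
--         all_the_same = True
--         for i in range(seq_end, len(id), len(sequence)):
--             if sequence != id[i:i + len(sequence)]:
--                 all_the_same = False
--
--         if all_the_same:
--             return True
--     return False
-- ===== SOURCE B (Python) =====
-- def better_is_invalid(id):
--     id = str(id)
--     n = len(id)
--     return any(id == id[:d] * (n // d) for d in range(1, n // 2 + 1) if n % d == 0)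
-- ===== Notes on version B (the rewrite author's own statement) =====
-- stated objective: faster
-- what changed: B tests only the divisors d of len(id) and compares id against its length-d prefix replicated len(id)//d times (one string equality per divisor), instead of A's scan of every candidate length 1..n//2 with a chunk-by-chunk inner loop that never breaks early.
import Mathlib
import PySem

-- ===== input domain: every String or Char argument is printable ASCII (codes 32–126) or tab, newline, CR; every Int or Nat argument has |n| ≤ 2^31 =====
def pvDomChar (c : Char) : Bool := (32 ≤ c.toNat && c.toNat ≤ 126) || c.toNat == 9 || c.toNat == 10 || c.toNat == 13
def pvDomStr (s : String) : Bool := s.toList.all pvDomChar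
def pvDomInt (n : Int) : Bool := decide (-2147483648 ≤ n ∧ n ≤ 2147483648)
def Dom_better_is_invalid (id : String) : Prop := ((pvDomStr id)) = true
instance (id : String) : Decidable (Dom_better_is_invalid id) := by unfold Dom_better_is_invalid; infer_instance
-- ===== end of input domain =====

-- B checks only the divisors of len(id) and compares against the replicated prefix,
-- instead of A's chunk-scan for every candidate length (objective: faster).

-- ===== PORT A =====
def better_is_invalid_inner (id : String) (d : Int) : Bool :=
  let sequence := PySem.Str.slice id none (some d)
  (PySem.List.pyRange d (PySem.Str.len id) (PySem.Str.len sequence)).foldl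
    (fun all_the_same i =>
      if sequence ≠ PySem.Str.slice id (some i) (some (i + PySem.Str.len sequence)) then false
      else all_the_same) true

def better_is_invalid_loop (id : String) : List Int → Bool
  | [] => false
  | d :: rest => if better_is_invalid_inner id d then true else better_is_invalid_loop id rest

def better_is_invalid (id : String) : Bool :=
  better_is_invalid_loop id
    (PySem.List.pyRange 1 (PySem.Int.floordiv (PySem.Str.len id) 2 + 1) 1)

-- ===== PORT B =====
-- hand port of Python's `str * int` (exact: a nonpositive count gives the empty string, as in Python)
def pyStrMul (t : String) (m : Int) : String :=
  String.ofList (List.flatten (List.replicate m.toNat t.toList))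

def better_is_invalid_alt (id : String) : Bool :=
  let n := PySem.Str.len id
  ((PySem.List.pyRange 1 (PySem.Int.floordiv n 2 + 1) 1).filter
      (fun d => PySem.Int.mod n d == 0)).any
    (fun d => id == pyStrMul (PySem.Str.slice id none (some d)) (PySem.Int.floordiv n d))

-- ===== PRECONDITION & SPEC =====
def Spec_better_is_invalid (id : String) (out : Bool) : Prop := out = better_is_invalid_alt id
instance (id : String) (out : Bool) : Decidable (Spec_better_is_invalid id out) := by unfold Spec_better_is_invalid; infer_instance

-- ===== CLAIM (what is proved, stated in full; the proofs are below) =====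
def Claim_equal_better_is_invalid : Prop := ∀ (id : String), Dom_better_is_invalid id → Spec_better_is_invalid id (better_is_invalid id)

-- ===== LEMMAS AND PROOFS =====

-- A's inner loop never breaks: the fold is `init && all chunks match`.
theorem foldl_exit {α β : Type} [DecidableEq β] (c : β) (q : α → β) (l : List α) (b : Bool) :
    l.foldl (fun acc i => if c ≠ q i then false else acc) b
      = (b && l.all (fun i => c == q i)) := by
  induction l generalizing b with
  | nil => simp
  | cons x xs ih =>
      simp only [List.foldl_cons, List.all_cons, ih]
      by_cases h : c = q x <;> simp [h]

-- Characterisation shared by both per-candidate checks: all length-D chunks of s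
-- (including the ragged last one) equal p  iff  D ∣ |s| and s is p repeated |s|/D times.
theorem chunks_iff (D : Nat) (hD : 0 < D) (p : List Char) (hp : p.length = D) :
    ∀ N : Nat, ∀ s : List Char, s.length = N →
      ((∀ j : Nat, D ∣ j → j < s.length → (s.drop j).take D = p) ↔
        (D ∣ s.length ∧ s = (List.replicate (s.length / D) p).flatten)) := by
  intro N
  induction N using Nat.strong_induction_on with
  | _ N ih =>
    intro s hlen
    rcases Nat.lt_or_ge s.length D with hlt | hge
    · rcases Nat.eq_zero_or_pos s.length with h0 | hpos
      · have hs : s = [] := List.length_eq_zero_iff.mp h0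
        subst hs; simp
      · apply iff_of_false
        · intro h
          have h0 := h 0 (dvd_zero D) (by omega)
          have hlen0 := congrArg List.length h0
          simp [hp] at hlen0
          omega
        · rintro ⟨hdvd, -⟩
          exact absurd (Nat.le_of_dvd hpos hdvd) (by omega)
    · -- D ≤ s.length : peel one chunk and use the induction hypothesis on s.drop D
      have hts : (s.drop D).length = s.length - D := by simp
      have IH := ih (s.length - D) (by omega) (s.drop D) (by omega)
      rw [hts] at IH
      have hq : s.length / D = (s.length - D) / D + 1 := by
        have h1 : s.length = (s.length - D) + D := by omega
        conv_lhs => rw [h1]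
        exact Nat.add_div_right _ hD
      have hsplit : ∀ r : List Char, s = p ++ r ↔ (s.take D = p ∧ s.drop D = r) := by
        intro r
        constructor
        · intro h
          constructor
          · rw [h, ← hp]; exact List.take_left
          · rw [h, ← hp]; exact List.drop_left
        · rintro ⟨h1, h2⟩
          conv_lhs => rw [← List.take_append_drop D s]
          rw [h1, h2]
      constructor
      · intro h
        have h0 : s.take D = p := by simpa using h 0 (dvd_zero D) (by omega)
        have hrest : ∀ j' : Nat, D ∣ j' → j' < s.length - D → ((s.drop D).drop j').take D = p := by
          intro j' hd hj
          rw [List.drop_drop]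
          exact h (D + j') (Dvd.dvd.add (dvd_refl D) hd) (by omega)
        have hIH := IH.mp hrest
        refine ⟨?_, ?_⟩
        · have h1 : s.length = (s.length - D) + D := by omega
          rw [h1]; exact Dvd.dvd.add hIH.1 (dvd_refl D)
        · rw [hq, List.replicate_succ, List.flatten_cons]
          exact (hsplit _).mpr ⟨h0, hIH.2⟩
      · rintro ⟨hdvd, hrep⟩
        have hdt : D ∣ s.length - D := Nat.dvd_sub hdvd (dvd_refl D)
        rw [hq, List.replicate_succ, List.flatten_cons, hsplit _] at hrep
        have hall := IH.mpr ⟨hdt, hrep.2⟩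
        intro j hdj hj
        rcases Nat.eq_zero_or_pos j with rfl | hjpos
        · simpa using hrep.1
        · have hDj : D ≤ j := Nat.le_of_dvd hjpos hdj
          have := hall (j - D) (Nat.dvd_sub hdj (dvd_refl D)) (by omega)
          rw [List.drop_drop] at this
          have hj' : D + (j - D) = j := by omega
          rwa [hj'] at this

-- Per-candidate agreement: A's chunk scan for d equals B's divisor-test-and-replicate for d.
theorem inner_eq (id : String) (d : Int) (h1 : 1 ≤ d)
    (h2 : d < PySem.Int.floordiv (PySem.Str.len id) 2 + 1) :
    better_is_invalid_inner id d =
      ((PySem.Int.mod (PySem.Str.len id) d == 0) &&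
        (id == pyStrMul (PySem.Str.slice id none (some d)) (PySem.Int.floordiv (PySem.Str.len id) d))) := by
  have hd0 : 0 ≤ d := by omega
  set s := id.toList with hsdef
  set N := s.length with hN
  set D := d.toNat with hDdef
  have hdD : d = (D : Int) := (Int.toNat_of_nonneg hd0).symm
  have hDpos : 0 < D := by omega
  have hlen : PySem.Str.len id = (N : Int) := by rw [PySem.Str.len_eq]
  have h2D : 2 * D ≤ N := by
    rw [hlen] at h2
    have hfd : PySem.Int.floordiv (N : Int) 2 = ((N / 2 : Nat) : Int) := by
      exact_mod_cast PySem.Int.floordiv_natCast N 2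
    rw [hfd] at h2
    omega
  have hDN : D ≤ N := by omega
  have hseq : (PySem.Str.slice id none (some d)).toList = s.take D := by
    rw [PySem.Str.toList_slice, PySem.Chars.slice_eq_listSlice, PySem.List.slice_to _ hd0]
  have hseqlen : PySem.Str.len (PySem.Str.slice id none (some d)) = (D : Int) := by
    rw [PySem.Str.len_eq, hseq]
    simp
    omega
  have hplen : (s.take D).length = D := by simp; omega
  have hslice : ∀ i : Int, 0 ≤ i →
      (PySem.Str.slice id (some i) (some (i + (D : Int)))).toList = (s.drop i.toNat).take D := by
    intro i hi
    rw [PySem.Str.toList_slice, PySem.Chars.slice_eq_listSlice,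
      PySem.List.slice_toNat _ hi (by omega)]
    congr 1
    omega
  have hmod : ((PySem.Int.mod (N : Int) d == 0) = true) ↔ D ∣ N := by
    rw [beq_iff_eq, PySem.Int.mod_eq_zero_iff_dvd, hdD]
    exact Int.natCast_dvd_natCast
  have hrep : ((id == pyStrMul (PySem.Str.slice id none (some d)) (PySem.Int.floordiv (N : Int) d)) = true)
      ↔ s = (List.replicate (N / D) (s.take D)).flatten := by
    rw [beq_iff_eq, String.ext_iff]
    simp only [pyStrMul, String.toList_ofList, hseq]
    have hfd : (PySem.Int.floordiv (N : Int) d).toNat = N / D := by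
      rw [hdD, PySem.Int.floordiv_natCast]
      exact Int.toNat_natCast _
    rw [hfd]
  have hchunks := chunks_iff D hDpos (s.take D) hplen N s hN.symm
  simp only [better_is_invalid_inner]
  rw [hlen, hseqlen, foldl_exit, Bool.true_and, Bool.eq_iff_iff, List.all_eq_true,
    Bool.and_eq_true, hmod, hrep]
  have hmem : ∀ i : Int, i ∈ PySem.List.pyRange d (N : Int) (D : Int) ↔
      (d ≤ i ∧ i < (N : Int) ∧ (D : Int) ∣ i - d) :=
    PySem.List.mem_pyRange_iff_of_pos (by omega)
  constructor
  · intro h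
    refine (fun hc => ⟨hc.1, hc.2⟩) (hchunks.mp ?_)
    intro j hdj hj
    rcases Nat.eq_zero_or_pos j with rfl | hjpos
    · simp
    · have hDj : D ≤ j := Nat.le_of_dvd hjpos hdj
      have hjmem : (j : Int) ∈ PySem.List.pyRange d (N : Int) (D : Int) := by
        rw [hmem, hdD]
        refine ⟨by exact_mod_cast hDj, by exact_mod_cast hj, ?_⟩
        have hsub : D ∣ j - D := Nat.dvd_sub hdj (dvd_refl D)
        have : ((j : Int) - (D : Int)) = ((j - D : Nat) : Int) := by omega
        rw [this]
        exact_mod_cast hsub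
      have heq := beq_iff_eq.mp (h _ hjmem)
      have htl := congrArg String.toList heq
      rw [hseq, hslice (j : Int) (by positivity)] at htl
      simp only [Int.toNat_natCast] at htl
      exact htl.symm
  · rintro ⟨hm, hr⟩
    have hall := hchunks.mpr ⟨hm, hr⟩
    intro i hi
    rw [hmem] at hi
    obtain ⟨hi1, hi2, hi3⟩ := hi
    have hi0 : 0 ≤ i := by omega
    have hdi : (D : Int) ∣ i := by
      have h4 := Dvd.dvd.add hi3 (dvd_refl (D : Int))
      rw [hdD] at h4
      simpa using h4
    have hdj : D ∣ i.toNat := by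
      rw [← Int.toNat_of_nonneg hi0] at hdi
      exact_mod_cast hdi
    have hjN : i.toNat < N := by omega
    have := hall i.toNat hdj hjN
    rw [beq_iff_eq, String.ext_iff, hseq, hslice i hi0]
    exact this.symm

theorem loop_eq_any (id : String) (l : List Int) :
    better_is_invalid_loop id l = l.any (better_is_invalid_inner id) := by
  induction l with
  | nil => rfl
  | cons d rest ih => simp [better_is_invalid_loop, ih]

-- ===== VERDICT (by name: the statement is the Claim_ definition above) =====
theorem better_is_invalid_spec : Claim_equal_better_is_invalid := by
  intro id _hdom
  unfold Spec_better_is_invalid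
  simp only [better_is_invalid, better_is_invalid_alt]
  rw [loop_eq_any, List.any_filter]
  apply PySem.List.any_congr_mem
  intro d hd
  have hm := (PySem.List.mem_pyRange_one).mp hd
  exact inner_eq id d hm.1 hm.2
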